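-- pv_equiv track=rewrite | github.com/ilkka-torma/gol-preim | patfinder.py | subset_sorted
-- ===== SOURCE A (Python) =====
-- def subset_sorted(s1, s2):
--     if s1:
--         if s2:
--             if s1[0] == s2[0]:
--                 return subset_sorted(s1[1:], s2[1:])
--             elif s1[0] < s2[0]:
--                 return False
--             else:
--                 return subset_sorted(s1, s2[1:])
--         else:
--             return False
--     else:
--         return True
-- ===== SOURCE B (Python) =====
-- def subset_sorted(s1, s2):
--     i = 0
--     n = len(s1)
--     for x in s2:
--         if i < n:
--             if s1[i] == x:
--                 i += 1
--             elif s1[i] < x: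
--                 return False
--     return i == n
-- ===== Notes on version B (the rewrite author's own statement) =====
-- stated objective: faster
-- what changed: Replaced the slicing recursion with a single iterative pass over s2 carrying an index pointer into s1, so no list copies are made.
import Mathlib
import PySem

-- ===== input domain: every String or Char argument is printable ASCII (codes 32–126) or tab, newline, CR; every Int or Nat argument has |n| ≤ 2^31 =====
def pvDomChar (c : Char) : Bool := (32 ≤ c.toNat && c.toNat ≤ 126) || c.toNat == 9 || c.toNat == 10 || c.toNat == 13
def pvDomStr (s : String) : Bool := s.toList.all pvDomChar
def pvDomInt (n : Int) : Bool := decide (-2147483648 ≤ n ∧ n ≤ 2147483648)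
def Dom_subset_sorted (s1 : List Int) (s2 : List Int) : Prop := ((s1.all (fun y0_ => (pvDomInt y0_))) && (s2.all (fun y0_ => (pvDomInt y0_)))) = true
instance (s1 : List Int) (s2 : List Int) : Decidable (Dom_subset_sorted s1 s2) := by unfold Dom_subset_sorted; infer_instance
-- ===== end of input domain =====

-- B replaces A's slicing recursion by one iterative pass over s2 with an index pointer into s1 (faster: no list copies).

-- ===== PORT A =====
-- literal transliteration of A's recursion (s1[1:], s2[1:] = structural tails)
def subset_sorted (s1 : List Int) (s2 : List Int) : Bool :=
  match s1, s2 with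
  | a :: t1, b :: t2 =>
      if a == b then subset_sorted t1 t2
      else if a < b then false
      else subset_sorted (a :: t1) t2
  | _ :: _, [] => false
  | [], _ => true
termination_by s1.length + s2.length

-- ===== PORT B =====
-- the for-loop over s2 of Source B, carrying the index i into s1; early `return False` = the `false` branch
def subsetAltGo (s1 : List Int) (i : Nat) : List Int → Bool
  | [] => i == s1.length
  | x :: rest =>
      if i < s1.length then
        if s1.getD i 0 == x then subsetAltGo s1 (i + 1) rest
        else if s1.getD i 0 < x then false
        else subsetAltGo s1 i rest
      else subsetAltGo s1 i rest

def subset_sorted_alt (s1 : List Int) (s2 : List Int) : Bool :=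
  subsetAltGo s1 0 s2

-- ===== PRECONDITION & SPEC =====
def Spec_subset_sorted (s1 : List Int) (s2 : List Int) (out : Bool) : Prop := out = subset_sorted_alt s1 s2
instance (s1 : List Int) (s2 : List Int) (out : Bool) : Decidable (Spec_subset_sorted s1 s2 out) := by unfold Spec_subset_sorted; infer_instance

-- ===== CLAIM (what is proved, stated in full; the proofs are below) =====
def Claim_equal_subset_sorted : Prop := ∀ (s1 : List Int) (s2 : List Int), Dom_subset_sorted s1 s2 → Spec_subset_sorted s1 s2 (subset_sorted s1 s2)

-- ===== LEMMAS AND PROOFS =====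

-- unfolding equations of A's well-founded recursion
theorem subset_sorted_nil (l : List Int) : subset_sorted [] l = true := by
  rw [subset_sorted.eq_def]

theorem subset_sorted_cons_nil (a : Int) (t1 : List Int) :
    subset_sorted (a :: t1) [] = false := by
  rw [subset_sorted.eq_def]

theorem subset_sorted_cons (a b : Int) (t1 t2 : List Int) :
    subset_sorted (a :: t1) (b :: t2) =
      if a == b then subset_sorted t1 t2
      else if a < b then false
      else subset_sorted (a :: t1) t2 := by
  rw [subset_sorted.eq_def]

-- B's loop at pointer i computes A on the suffix s1.drop i.
theorem subsetAltGo_eq_drop (s1 : List Int) (s2 : List Int) :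
    ∀ i : Nat, i ≤ s1.length → subsetAltGo s1 i s2 = subset_sorted (s1.drop i) s2 := by
  induction s2 with
  | nil =>
      intro i hi
      rcases Nat.lt_or_ge i s1.length with h | h
      · have hne : s1.drop i ≠ [] := by
          simp [List.drop_eq_nil_iff]; omega
        rcases hd : s1.drop i with _ | ⟨a, t⟩
        · exact absurd hd hne
        · simp [subsetAltGo, subset_sorted_cons_nil]
          omega
      · have hieq : i = s1.length := le_antisymm hi h
        simp [subsetAltGo, hieq, List.drop_length, subset_sorted_nil]
  | cons x rest ih =>
      intro i hi
      rcases Nat.lt_or_ge i s1.length with h | h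
      · have hd : s1.drop i = s1[i] :: s1.drop (i + 1) :=
          List.drop_eq_getElem_cons h
        have hgetD : s1.getD i 0 = s1[i] := List.getD_eq_getElem s1 0 h
        rw [hd, subset_sorted_cons]
        simp only [subsetAltGo, if_pos h, hgetD]
        by_cases h1 : s1[i] = x
        · simp [h1, ih (i + 1) (by omega)]
        · by_cases h2 : s1[i] < x
          · simp [h1, h2]
          · have hb : ¬ ((s1[i] == x) = true) := by simp [h1]
            rw [if_neg hb, if_neg hb, if_neg h2, if_neg h2, ih i (by omega), hd]
      · have hieq : i = s1.length := le_antisymm hi h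
        have hd : s1.drop i = [] := by simp [hieq]
        simp only [subsetAltGo, hd, if_neg (by omega : ¬ i < s1.length)]
        rw [ih i hi, hd, subset_sorted_nil, subset_sorted_nil]

-- ===== VERDICT (by name: the statement is the Claim_ definition above) =====
theorem subset_sorted_spec : Claim_equal_subset_sorted := by
  intro s1 s2 _
  unfold Spec_subset_sorted subset_sorted_alt
  rw [subsetAltGo_eq_drop s1 s2 0 (Nat.zero_le _), List.drop_zero]
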